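-- pv_equiv track=rewrite | github.com/JeeZeh/kattis.py | Solutions/2048.py | solve
-- ===== SOURCE A (Python) =====
-- def solve(board, direction):
--     """
--     Solves the board as if it were collapsing from left to right
--     """
--
--     # Rotate so we're collapsing in the right direction
--     if direction == 3:
--         board = rotate(board, 3)
--     elif direction == 0:
--         board = rotate(board, 2)
--     elif direction == 1:
--         board = rotate(board, 1)
--
--     # Start at top right, going right to left, row by row
--     i, j = [0, 3]
--
--     # Continue until we've reached the last row
--     while i < 4:
--         # Look one poisition to the left of the current number
--         p = [i, j - 1]
--         curr_num = board[i][j]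
--
--         # Compare with numbers to the left
--         while p[1] >= 0:
--             # Number to compare our current number with
--             compare = board[p[0]][p[1]]
--
--             if curr_num == 0:
--                 if compare != 0:
--                     # Collapse the compared number onto the 0
--                     board[i][j] = compare
--                     board[p[0]][p[1]] = 0
--
--
--                     # Rather than moving to the next position, update the current number
--                     # (it's been collapsed onto where our 0 was)
--                     curr_num = board[i][j]
--                     p = [i, j] # Set our pointer to the current number as it will be moved left after this
--             elif compare == curr_num:
--                 # Collapse onto our current number
--                 board[i][j] = 2 * curr_num
--                 board[p[0]][p[1]] = 0
--                 break # Move onto the next position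
--             elif compare != 0:
--                 # We've reached some non-zero value that differs from our current number
--                 # so we cannot perform any more collapsing onto position [i][j]
--                 break
--
--             p = [p[0], p[1] - 1]
--
--         # If we've reached the end of the row, move down
--         if j == 0:
--             i += 1
--             j = 3
--         else:
--             i += 0
--             j += -1
--
--     # We need to rotate our board back to the way it was given
--     if direction == 3:
--         board = rotate(board, 1)
--     elif direction == 0:
--         board = rotate(board, 2)
--     elif direction == 1:
--         board = rotate(board, 3)
--
--     return board
--
-- def rotate(board, times):
--     """
--     Performs some funky rotation using zips and stuff
--     https://stackoverflow.com/questions/8421337/rotating-a-two-dimensional-array-in-python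
--     """
--     for i in range(times):
--         board = list(zip(*board[::-1]))
--
--     return [[x for x in row] for row in board]
-- ===== SOURCE B (Python) =====
-- def _merged_right(vals):
--     """Merge equal adjacent tiles of a compressed line, rightmost pair first."""
--     out = []
--     i = len(vals) - 1
--     while i >= 0:
--         if i > 0 and vals[i] == vals[i - 1]:
--             out.append(2 * vals[i])
--             i -= 2
--         else:
--             out.append(vals[i])
--             i -= 1
--     out.reverse()
--     return out
--
--
-- def _rotate(board, times):
--     for _ in range(times):
--         board = [list(row) for row in zip(*board[::-1])]
--     return board
--
--
-- def solve(board, direction):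
--     # Rotate so the collapse direction becomes "toward column 3"
--     if direction == 3:
--         board = _rotate(board, 3)
--     elif direction == 0:
--         board = _rotate(board, 2)
--     elif direction == 1:
--         board = _rotate(board, 1)
--
--     # Collapse each line of the 4x4 grid: drop zeros, merge adjacent equal
--     # tiles from the right, pad with zeros on the left
--     for i in range(4):
--         row = board[i]
--         merged = _merged_right([v for v in row[:4] if v != 0])
--         row[:4] = [0] * (4 - len(merged)) + merged
--
--     # Rotate back
--     if direction == 3:
--         board = _rotate(board, 1)
--     elif direction == 0:
--         board = _rotate(board, 2)
--     elif direction == 1: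
--         board = _rotate(board, 3)
--
--     return board
-- ===== Notes on version B (the rewrite author's own statement) =====
-- stated objective: simpler
-- what changed: Keeps the rotate-in/rotate-out dispatch but replaces A's two-pointer inner collapse (a scanning pointer that walks left, pulls values onto zeros and restarts) with a per-line compress-nonzeros-then-merge-adjacent pass; Pre_ excludes only the inputs on which A raises IndexError (fewer than 4 rows, or lines shorter than 4 in the touched window).
import Mathlib
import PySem

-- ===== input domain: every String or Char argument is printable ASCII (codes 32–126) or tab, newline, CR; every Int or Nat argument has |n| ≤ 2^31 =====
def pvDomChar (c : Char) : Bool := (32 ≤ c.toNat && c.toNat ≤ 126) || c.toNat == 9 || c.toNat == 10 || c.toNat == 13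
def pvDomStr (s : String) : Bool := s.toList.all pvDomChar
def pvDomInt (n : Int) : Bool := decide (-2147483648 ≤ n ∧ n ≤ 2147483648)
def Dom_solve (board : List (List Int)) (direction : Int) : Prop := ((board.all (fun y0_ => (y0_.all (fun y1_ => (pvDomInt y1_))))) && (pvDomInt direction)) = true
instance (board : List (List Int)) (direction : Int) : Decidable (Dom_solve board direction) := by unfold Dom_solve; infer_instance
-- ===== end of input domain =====

-- B keeps A's rotate-in/rotate-out dispatch but replaces the two-pointer pull-and-restart
-- collapse with a per-line compress-nonzeros-then-merge-adjacent pass (objective: simpler).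
-- Side effects: like A, both mutate the caller's rows in place only on the non-rotating
-- (default) path; the equivalence proved is about the RETURN value.

-- ===== PORT A =====
-- board[i][p] read / write; row index i is A's own loop counter (always 0..3), column index may be
-- the scanning pointer p (an Int). The .getD defaults are totality guards only: under Pre_solve all
-- indices are in range (Python would raise IndexError where pyGet? is none).
def pvGet (b : List (List Int)) (i : Nat) (p : Int) : Int :=
  (PySem.List.pyGet? (b.getD i []) p).getD 0

def pvSet (b : List (List Int)) (i : Nat) (p : Int) (v : Int) : List (List Int) :=
  b.set i ((b.getD i []).set p.toNat v)

-- A's inner `while p[1] >= 0` loop.  p[0] is always i, so only p[1] is carried (as `p1`).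
-- fuel: the loop body runs at most 2*j+1 ≤ 7 times (p1 starts at j-1, decreases each iteration,
-- and is reset to j-1 at most once, since after a reset curr ≠ 0); 9 is a safe bound.
def innerA (fuel : Nat) (b : List (List Int)) (i j : Nat) (p1 : Int) (curr : Int) : List (List Int) :=
  match fuel with
  | 0 => b
  | f+1 =>
    if p1 ≥ 0 then
      let cmp := pvGet b i p1
      if curr = 0 then
        (if cmp ≠ 0 then
          -- collapse the compared number onto the 0; pointer resets to [i,j], then steps left
          innerA f (pvSet (pvSet b i (Int.ofNat j) cmp) i p1 0) i j (Int.ofNat j - 1) cmp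
        else innerA f b i j (p1 - 1) curr)
      else if cmp = curr then
        pvSet (pvSet b i (Int.ofNat j) (2*curr)) i p1 0     -- merge, then break
      else if cmp ≠ 0 then b                                 -- blocked, break
      else innerA f b i j (p1 - 1) curr
    else b

-- one outer-loop iteration at position (i, j)
def stepA (b : List (List Int)) (i j : Nat) : List (List Int) :=
  innerA 9 b i j (Int.ofNat j - 1) (pvGet b i (Int.ofNat j))

-- A's rotate helper: list(zip(*board[::-1])), `times` times.  zip(*rows) is ported exactly:
-- output length = minimum row length (0 for no rows), k-th tuple = k-th element of each row
-- (the getD default is unreachable for k < every length).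
def zipStar (rows : List (List Int)) : List (List Int) :=
  (List.range (((rows.map List.length).min?).getD 0)).map (fun k => rows.map (fun r => r.getD k 0))

def rotateA (b : List (List Int)) (times : Nat) : List (List Int) :=
  ((fun x => zipStar x.reverse)^[times] b).map (fun row => row.map (fun x => x))

def solve (board : List (List Int)) (direction : Int) : List (List Int) :=
  let b1 := if direction = 3 then rotateA board 3
            else if direction = 0 then rotateA board 2
            else if direction = 1 then rotateA board 1
            else board
  -- while i < 4, j running 3,2,1,0 then next row: the obvious nested fold
  let b2 := (List.range 4).foldl (fun b i => [3,2,1,0].foldl (fun b j => stepA b i j) b) b1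
  if direction = 3 then rotateA b2 1
  else if direction = 0 then rotateA b2 2
  else if direction = 1 then rotateA b2 3
  else b2

-- ===== PORT B =====
-- B's merge loop scans `vals` from its right end, merging one adjacent equal pair at a time;
-- this is that loop as structural recursion on the reversed list (output also right-to-left).
def mergeRevB : List Int → List Int
  | [] => []
  | [x] => [x]
  | x :: y :: t => if x = y then (2*x) :: mergeRevB t else x :: mergeRevB (y :: t)

-- B's _rotate: list(zip(*board[::-1])) per step, same zip semantics as A's rotate helper
def zipStarB (rows : List (List Int)) : List (List Int) :=
  (List.range (((rows.map List.length).min?).getD 0)).map (fun k => rows.map (fun r => r.getD k 0))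

def rotateB (b : List (List Int)) (times : Nat) : List (List Int) :=
  (fun x => zipStarB x.reverse)^[times] b

-- one loop body: row = board[i]; merged = _merged_right(nonzeros of row[:4]); row[:4] = pad+merged
def collapseW (row : List Int) : List Int :=
  let merged := (mergeRevB (((row.take 4).filter (fun v => v ≠ 0)).reverse)).reverse
  (List.replicate (4 - merged.length) 0 ++ merged) ++ row.drop 4

def solve_alt (board : List (List Int)) (direction : Int) : List (List Int) :=
  let b1 := if direction = 3 then rotateB board 3
            else if direction = 0 then rotateB board 2
            else if direction = 1 then rotateB board 1
            else board
  -- for i in range(4): board[i][:4] = collapsed line (board[i] read; .getD is a totality guard,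
  -- in range under Pre_solve where Python would raise IndexError)
  let b2 := (List.range 4).foldl (fun b i => b.set i (collapseW (b.getD i []))) b1
  if direction = 3 then rotateB b2 1
  else if direction = 0 then rotateB b2 2
  else if direction = 1 then rotateB b2 3
  else b2

-- ===== PRECONDITION & SPEC =====
-- Pre_ is exactly the inputs on which A returns (elsewhere A raises IndexError): for the
-- rotating directions 0/1/3 the rotated board must have 4 rows of 4, i.e. at least 4 rows and
-- every row at least 4 wide (zip truncates to the shortest row); for every other direction A
-- touches only board[0..3][0..3], so at least 4 rows whose first four are each at least 4 wide.
def Pre_solve (board : List (List Int)) (direction : Int) : Prop :=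
  ((direction = 0 ∨ direction = 1 ∨ direction = 3) →
    (4 ≤ board.length ∧ ∀ r ∈ board, 4 ≤ r.length)) ∧
  (¬(direction = 0 ∨ direction = 1 ∨ direction = 3) →
    (4 ≤ board.length ∧ ∀ r ∈ board.take 4, 4 ≤ r.length))

instance (board : List (List Int)) (direction : Int) : Decidable (Pre_solve board direction) := by
  unfold Pre_solve; infer_instance

def pvWitness_solve : List (List Int) × Int :=
  ([[2, 2, 0, 4], [0, 0, 0, 0], [2, 0, 2, 0], [4, 4, 8, 8]], 2)

def Spec_solve (board : List (List Int)) (direction : Int) (out : List (List Int)) : Prop := out = solve_alt board direction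
instance (board : List (List Int)) (direction : Int) (out : List (List Int)) : Decidable (Spec_solve board direction out) := by unfold Spec_solve; infer_instance

-- ===== CLAIM (what is proved, stated in full; the proofs are below) =====
def Claim_equal_solve : Prop := ∀ (board : List (List Int)) (direction : Int), Dom_solve board direction → Pre_solve board direction → Spec_solve board direction (solve board direction)

-- ===== LEMMAS AND PROOFS =====

-- semantic value of one collapsed 4-cell line (proof helper, used to state procRow_eq)
def collapseR (row : List Int) : List Int :=
  let vals := row.filter (fun v => v ≠ 0)
  let out := (mergeRevB vals.reverse).reverse
  List.replicate (row.length - out.length) 0 ++ out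

-- row-level mirror of innerA (proof helper)
def rowInner : Nat → List Int → Nat → Int → Int → List Int
  | 0, r, _, _, _ => r
  | f+1, r, j, p1, curr =>
    if p1 ≥ 0 then
      let cmp := (PySem.List.pyGet? r p1).getD 0
      if curr = 0 then
        (if cmp ≠ 0 then rowInner f ((r.set j cmp).set p1.toNat 0) j (Int.ofNat j - 1) cmp
         else rowInner f r j (p1 - 1) curr)
      else if cmp = curr then (r.set j (2*curr)).set p1.toNat 0
      else if cmp ≠ 0 then r
      else rowInner f r j (p1 - 1) curr
    else r

def stepRow (r : List Int) (j : Nat) : List Int :=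
  rowInner 9 r j (Int.ofNat j - 1) ((PySem.List.pyGet? r (Int.ofNat j)).getD 0)

def procRow (r : List Int) : List Int :=
  stepRow (stepRow (stepRow (stepRow r 3) 2) 1) 0

theorem innerA_zero (f : Nat) (r : List Int) (rest : List (List Int)) (j : Nat) (p1 curr : Int) :
    innerA f (r :: rest) 0 j p1 curr = rowInner f r j p1 curr :: rest := by
  induction f generalizing r p1 curr with
  | zero => rfl
  | succ f ih => simp only [innerA, rowInner, pvGet, pvSet, List.getD_cons_zero, List.set_cons_zero]
                 split_ifs <;> simp [ih]

theorem innerA_succ (f : Nat) (r : List Int) (rest : List (List Int)) (i j : Nat) (p1 curr : Int) :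
    innerA f (r :: rest) (i+1) j p1 curr = r :: innerA f rest i j p1 curr := by
  induction f generalizing rest p1 curr with
  | zero => rfl
  | succ f ih => simp only [innerA, pvGet, pvSet, List.getD_cons_succ, List.set_cons_succ]
                 split_ifs <;> simp [ih]

theorem stepA_zero (r : List Int) (rest : List (List Int)) (j : Nat) :
    stepA (r :: rest) 0 j = stepRow r j :: rest := by
  simp [stepA, stepRow, innerA_zero, pvGet]

theorem stepA_succ (r : List Int) (rest : List (List Int)) (i j : Nat) :
    stepA (r :: rest) (i+1) j = r :: stepA rest i j := by
  simp [stepA, innerA_succ, pvGet]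
-- the core per-row equality: A's pointer collapse = B's compress-and-merge, on a 4-cell row
set_option maxHeartbeats 16000000 in
theorem procRow_eq (a b c d : Int) : procRow [a, b, c, d] = collapseR [a, b, c, d] := by
  by_cases ha : a = 0 <;> by_cases hb : b = 0 <;> by_cases hc : c = 0 <;> by_cases hd : d = 0
  · simp only [ha, hb, hc, hd] at *
    have e3 : stepRow [0, 0, 0, 0] 3 = [0, 0, 0, 0] := by simp [stepRow, rowInner, PySem.List.pyGet?, PySem.List.pyIdx?]
    have e2 : stepRow [0, 0, 0, 0] 2 = [0, 0, 0, 0] := by simp [stepRow, rowInner, PySem.List.pyGet?, PySem.List.pyIdx?]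
    have e1 : stepRow [0, 0, 0, 0] 1 = [0, 0, 0, 0] := by simp [stepRow, rowInner, PySem.List.pyGet?, PySem.List.pyIdx?]
    have e0 : stepRow [0, 0, 0, 0] 0 = [0, 0, 0, 0] := by simp [stepRow, rowInner, PySem.List.pyGet?, PySem.List.pyIdx?]
    have eB : collapseR [0, 0, 0, 0] = [0, 0, 0, 0] := by simp [collapseR, mergeRevB]
    simp only [procRow]
    rw [e3, e2, e1, e0, eB]
  · simp only [ha, hb, hc] at *
    have e3 : stepRow [0, 0, 0, d] 3 = [0, 0, 0, d] := by simp [stepRow, rowInner, PySem.List.pyGet?, PySem.List.pyIdx?, hd, Ne.symm hd]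
    have e2 : stepRow [0, 0, 0, d] 2 = [0, 0, 0, d] := by simp [stepRow, rowInner, PySem.List.pyGet?, PySem.List.pyIdx?, hd, Ne.symm hd]
    have e1 : stepRow [0, 0, 0, d] 1 = [0, 0, 0, d] := by simp [stepRow, rowInner, PySem.List.pyGet?, PySem.List.pyIdx?, hd, Ne.symm hd]
    have e0 : stepRow [0, 0, 0, d] 0 = [0, 0, 0, d] := by simp [stepRow, rowInner, PySem.List.pyGet?, PySem.List.pyIdx?, hd, Ne.symm hd]
    have eB : collapseR [0, 0, 0, d] = [0, 0, 0, d] := by simp [collapseR, mergeRevB, hd, Ne.symm hd]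
    simp only [procRow]
    rw [e3, e2, e1, e0, eB]
  · simp only [ha, hb, hd] at *
    have e3 : stepRow [0, 0, c, 0] 3 = [0, 0, 0, c] := by simp [stepRow, rowInner, PySem.List.pyGet?, PySem.List.pyIdx?, hc, Ne.symm hc]
    have e2 : stepRow [0, 0, 0, c] 2 = [0, 0, 0, c] := by simp [stepRow, rowInner, PySem.List.pyGet?, PySem.List.pyIdx?, hc, Ne.symm hc]
    have e1 : stepRow [0, 0, 0, c] 1 = [0, 0, 0, c] := by simp [stepRow, rowInner, PySem.List.pyGet?, PySem.List.pyIdx?, hc, Ne.symm hc]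
    have e0 : stepRow [0, 0, 0, c] 0 = [0, 0, 0, c] := by simp [stepRow, rowInner, PySem.List.pyGet?, PySem.List.pyIdx?, hc, Ne.symm hc]
    have eB : collapseR [0, 0, c, 0] = [0, 0, 0, c] := by simp [collapseR, mergeRevB, hc, Ne.symm hc]
    simp only [procRow]
    rw [e3, e2, e1, e0, eB]
  · by_cases h0 : d = c
    · simp only [ha, hb, h0] at *
      have e3 : stepRow [0, 0, c, c] 3 = [0, 0, 0, 2*c] := by simp [stepRow, rowInner, PySem.List.pyGet?, PySem.List.pyIdx?, hc, hd, Ne.symm hc, Ne.symm hd]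
      have e2 : stepRow [0, 0, 0, 2*c] 2 = [0, 0, 0, 2*c] := by simp [stepRow, rowInner, PySem.List.pyGet?, PySem.List.pyIdx?, hc, hd, Ne.symm hc, Ne.symm hd]
      have e1 : stepRow [0, 0, 0, 2*c] 1 = [0, 0, 0, 2*c] := by simp [stepRow, rowInner, PySem.List.pyGet?, PySem.List.pyIdx?, hc, hd, Ne.symm hc, Ne.symm hd]
      have e0 : stepRow [0, 0, 0, 2*c] 0 = [0, 0, 0, 2*c] := by simp [stepRow, rowInner, PySem.List.pyGet?, PySem.List.pyIdx?, hc, hd, Ne.symm hc, Ne.symm hd]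
      have eB : collapseR [0, 0, c, c] = [0, 0, 0, 2*c] := by simp [collapseR, mergeRevB, hc, hd, Ne.symm hc, Ne.symm hd]
      simp only [procRow]
      rw [e3, e2, e1, e0, eB]
    · simp only [ha, hb] at *
      have e3 : stepRow [0, 0, c, d] 3 = [0, 0, c, d] := by simp [stepRow, rowInner, PySem.List.pyGet?, PySem.List.pyIdx?, hc, hd, h0, Ne.symm hc, Ne.symm hd, Ne.symm h0]
      have e2 : stepRow [0, 0, c, d] 2 = [0, 0, c, d] := by simp [stepRow, rowInner, PySem.List.pyGet?, PySem.List.pyIdx?, hc, hd, h0, Ne.symm hc, Ne.symm hd, Ne.symm h0]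
      have e1 : stepRow [0, 0, c, d] 1 = [0, 0, c, d] := by simp [stepRow, rowInner, PySem.List.pyGet?, PySem.List.pyIdx?, hc, hd, h0, Ne.symm hc, Ne.symm hd, Ne.symm h0]
      have e0 : stepRow [0, 0, c, d] 0 = [0, 0, c, d] := by simp [stepRow, rowInner, PySem.List.pyGet?, PySem.List.pyIdx?, hc, hd, h0, Ne.symm hc, Ne.symm hd, Ne.symm h0]
      have eB : collapseR [0, 0, c, d] = [0, 0, c, d] := by simp [collapseR, mergeRevB, hc, hd, h0, Ne.symm hc, Ne.symm hd, Ne.symm h0]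
      simp only [procRow]
      rw [e3, e2, e1, e0, eB]
  · simp only [ha, hc, hd] at *
    have e3 : stepRow [0, b, 0, 0] 3 = [0, 0, 0, b] := by simp [stepRow, rowInner, PySem.List.pyGet?, PySem.List.pyIdx?, hb, Ne.symm hb]
    have e2 : stepRow [0, 0, 0, b] 2 = [0, 0, 0, b] := by simp [stepRow, rowInner, PySem.List.pyGet?, PySem.List.pyIdx?, hb, Ne.symm hb]
    have e1 : stepRow [0, 0, 0, b] 1 = [0, 0, 0, b] := by simp [stepRow, rowInner, PySem.List.pyGet?, PySem.List.pyIdx?, hb, Ne.symm hb]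
    have e0 : stepRow [0, 0, 0, b] 0 = [0, 0, 0, b] := by simp [stepRow, rowInner, PySem.List.pyGet?, PySem.List.pyIdx?, hb, Ne.symm hb]
    have eB : collapseR [0, b, 0, 0] = [0, 0, 0, b] := by simp [collapseR, mergeRevB, hb, Ne.symm hb]
    simp only [procRow]
    rw [e3, e2, e1, e0, eB]
  · by_cases h0 : d = b
    · simp only [ha, hc, h0] at *
      have e3 : stepRow [0, b, 0, b] 3 = [0, 0, 0, 2*b] := by simp [stepRow, rowInner, PySem.List.pyGet?, PySem.List.pyIdx?, hb, hd, Ne.symm hb, Ne.symm hd]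
      have e2 : stepRow [0, 0, 0, 2*b] 2 = [0, 0, 0, 2*b] := by simp [stepRow, rowInner, PySem.List.pyGet?, PySem.List.pyIdx?, hb, hd, Ne.symm hb, Ne.symm hd]
      have e1 : stepRow [0, 0, 0, 2*b] 1 = [0, 0, 0, 2*b] := by simp [stepRow, rowInner, PySem.List.pyGet?, PySem.List.pyIdx?, hb, hd, Ne.symm hb, Ne.symm hd]
      have e0 : stepRow [0, 0, 0, 2*b] 0 = [0, 0, 0, 2*b] := by simp [stepRow, rowInner, PySem.List.pyGet?, PySem.List.pyIdx?, hb, hd, Ne.symm hb, Ne.symm hd]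
      have eB : collapseR [0, b, 0, b] = [0, 0, 0, 2*b] := by simp [collapseR, mergeRevB, hb, hd, Ne.symm hb, Ne.symm hd]
      simp only [procRow]
      rw [e3, e2, e1, e0, eB]
    · simp only [ha, hc] at *
      have e3 : stepRow [0, b, 0, d] 3 = [0, b, 0, d] := by simp [stepRow, rowInner, PySem.List.pyGet?, PySem.List.pyIdx?, hb, hd, h0, Ne.symm hb, Ne.symm hd, Ne.symm h0]
      have e2 : stepRow [0, b, 0, d] 2 = [0, 0, b, d] := by simp [stepRow, rowInner, PySem.List.pyGet?, PySem.List.pyIdx?, hb, hd, h0, Ne.symm hb, Ne.symm hd, Ne.symm h0]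
      have e1 : stepRow [0, 0, b, d] 1 = [0, 0, b, d] := by simp [stepRow, rowInner, PySem.List.pyGet?, PySem.List.pyIdx?, hb, hd, h0, Ne.symm hb, Ne.symm hd, Ne.symm h0]
      have e0 : stepRow [0, 0, b, d] 0 = [0, 0, b, d] := by simp [stepRow, rowInner, PySem.List.pyGet?, PySem.List.pyIdx?, hb, hd, h0, Ne.symm hb, Ne.symm hd, Ne.symm h0]
      have eB : collapseR [0, b, 0, d] = [0, 0, b, d] := by simp [collapseR, mergeRevB, hb, hd, h0, Ne.symm hb, Ne.symm hd, Ne.symm h0]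
      simp only [procRow]
      rw [e3, e2, e1, e0, eB]
  · by_cases h0 : c = b
    · simp only [ha, hd, h0] at *
      have e3 : stepRow [0, b, b, 0] 3 = [0, 0, 0, 2*b] := by simp [stepRow, rowInner, PySem.List.pyGet?, PySem.List.pyIdx?, hb, hc, Ne.symm hb, Ne.symm hc]
      have e2 : stepRow [0, 0, 0, 2*b] 2 = [0, 0, 0, 2*b] := by simp [stepRow, rowInner, PySem.List.pyGet?, PySem.List.pyIdx?, hb, hc, Ne.symm hb, Ne.symm hc]
      have e1 : stepRow [0, 0, 0, 2*b] 1 = [0, 0, 0, 2*b] := by simp [stepRow, rowInner, PySem.List.pyGet?, PySem.List.pyIdx?, hb, hc, Ne.symm hb, Ne.symm hc]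
      have e0 : stepRow [0, 0, 0, 2*b] 0 = [0, 0, 0, 2*b] := by simp [stepRow, rowInner, PySem.List.pyGet?, PySem.List.pyIdx?, hb, hc, Ne.symm hb, Ne.symm hc]
      have eB : collapseR [0, b, b, 0] = [0, 0, 0, 2*b] := by simp [collapseR, mergeRevB, hb, hc, Ne.symm hb, Ne.symm hc]
      simp only [procRow]
      rw [e3, e2, e1, e0, eB]
    · simp only [ha, hd] at *
      have e3 : stepRow [0, b, c, 0] 3 = [0, b, 0, c] := by simp [stepRow, rowInner, PySem.List.pyGet?, PySem.List.pyIdx?, hb, hc, h0, Ne.symm hb, Ne.symm hc, Ne.symm h0]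
      have e2 : stepRow [0, b, 0, c] 2 = [0, 0, b, c] := by simp [stepRow, rowInner, PySem.List.pyGet?, PySem.List.pyIdx?, hb, hc, h0, Ne.symm hb, Ne.symm hc, Ne.symm h0]
      have e1 : stepRow [0, 0, b, c] 1 = [0, 0, b, c] := by simp [stepRow, rowInner, PySem.List.pyGet?, PySem.List.pyIdx?, hb, hc, h0, Ne.symm hb, Ne.symm hc, Ne.symm h0]
      have e0 : stepRow [0, 0, b, c] 0 = [0, 0, b, c] := by simp [stepRow, rowInner, PySem.List.pyGet?, PySem.List.pyIdx?, hb, hc, h0, Ne.symm hb, Ne.symm hc, Ne.symm h0]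
      have eB : collapseR [0, b, c, 0] = [0, 0, b, c] := by simp [collapseR, mergeRevB, hb, hc, h0, Ne.symm hb, Ne.symm hc, Ne.symm h0]
      simp only [procRow]
      rw [e3, e2, e1, e0, eB]
  · by_cases h0 : c = b <;> by_cases h1 : d = c
    · simp only [ha, h0, h1] at *
      have e3 : stepRow [0, b, b, b] 3 = [0, b, 0, 2*b] := by simp [stepRow, rowInner, PySem.List.pyGet?, PySem.List.pyIdx?, hb, hc, hd, Ne.symm hb, Ne.symm hc, Ne.symm hd]
      have e2 : stepRow [0, b, 0, 2*b] 2 = [0, 0, b, 2*b] := by simp [stepRow, rowInner, PySem.List.pyGet?, PySem.List.pyIdx?, hb, hc, hd, Ne.symm hb, Ne.symm hc, Ne.symm hd]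
      have e1 : stepRow [0, 0, b, 2*b] 1 = [0, 0, b, 2*b] := by simp [stepRow, rowInner, PySem.List.pyGet?, PySem.List.pyIdx?, hb, hc, hd, Ne.symm hb, Ne.symm hc, Ne.symm hd]
      have e0 : stepRow [0, 0, b, 2*b] 0 = [0, 0, b, 2*b] := by simp [stepRow, rowInner, PySem.List.pyGet?, PySem.List.pyIdx?, hb, hc, hd, Ne.symm hb, Ne.symm hc, Ne.symm hd]
      have eB : collapseR [0, b, b, b] = [0, 0, b, 2*b] := by simp [collapseR, mergeRevB, hb, hc, hd, Ne.symm hb, Ne.symm hc, Ne.symm hd]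
      simp only [procRow]
      rw [e3, e2, e1, e0, eB]
    · simp only [ha, h0] at *
      have e3 : stepRow [0, b, b, d] 3 = [0, b, b, d] := by simp [stepRow, rowInner, PySem.List.pyGet?, PySem.List.pyIdx?, hb, hc, hd, h1, Ne.symm hb, Ne.symm hc, Ne.symm hd, Ne.symm h1]
      have e2 : stepRow [0, b, b, d] 2 = [0, 0, 2*b, d] := by simp [stepRow, rowInner, PySem.List.pyGet?, PySem.List.pyIdx?, hb, hc, hd, h1, Ne.symm hb, Ne.symm hc, Ne.symm hd, Ne.symm h1]
      have e1 : stepRow [0, 0, 2*b, d] 1 = [0, 0, 2*b, d] := by simp [stepRow, rowInner, PySem.List.pyGet?, PySem.List.pyIdx?, hb, hc, hd, h1, Ne.symm hb, Ne.symm hc, Ne.symm hd, Ne.symm h1]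
      have e0 : stepRow [0, 0, 2*b, d] 0 = [0, 0, 2*b, d] := by simp [stepRow, rowInner, PySem.List.pyGet?, PySem.List.pyIdx?, hb, hc, hd, h1, Ne.symm hb, Ne.symm hc, Ne.symm hd, Ne.symm h1]
      have eB : collapseR [0, b, b, d] = [0, 0, 2*b, d] := by simp [collapseR, mergeRevB, hb, hc, hd, h1, Ne.symm hb, Ne.symm hc, Ne.symm hd, Ne.symm h1]
      simp only [procRow]
      rw [e3, e2, e1, e0, eB]
    · simp only [ha, h1] at *
      have e3 : stepRow [0, b, c, c] 3 = [0, b, 0, 2*c] := by simp [stepRow, rowInner, PySem.List.pyGet?, PySem.List.pyIdx?, hb, hc, hd, h0, Ne.symm hb, Ne.symm hc, Ne.symm hd, Ne.symm h0]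
      have e2 : stepRow [0, b, 0, 2*c] 2 = [0, 0, b, 2*c] := by simp [stepRow, rowInner, PySem.List.pyGet?, PySem.List.pyIdx?, hb, hc, hd, h0, Ne.symm hb, Ne.symm hc, Ne.symm hd, Ne.symm h0]
      have e1 : stepRow [0, 0, b, 2*c] 1 = [0, 0, b, 2*c] := by simp [stepRow, rowInner, PySem.List.pyGet?, PySem.List.pyIdx?, hb, hc, hd, h0, Ne.symm hb, Ne.symm hc, Ne.symm hd, Ne.symm h0]
      have e0 : stepRow [0, 0, b, 2*c] 0 = [0, 0, b, 2*c] := by simp [stepRow, rowInner, PySem.List.pyGet?, PySem.List.pyIdx?, hb, hc, hd, h0, Ne.symm hb, Ne.symm hc, Ne.symm hd, Ne.symm h0]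
      have eB : collapseR [0, b, c, c] = [0, 0, b, 2*c] := by simp [collapseR, mergeRevB, hb, hc, hd, h0, Ne.symm hb, Ne.symm hc, Ne.symm hd, Ne.symm h0]
      simp only [procRow]
      rw [e3, e2, e1, e0, eB]
    · simp only [ha] at *
      have e3 : stepRow [0, b, c, d] 3 = [0, b, c, d] := by simp [stepRow, rowInner, PySem.List.pyGet?, PySem.List.pyIdx?, hb, hc, hd, h0, h1, Ne.symm hb, Ne.symm hc, Ne.symm hd, Ne.symm h0, Ne.symm h1]
      have e2 : stepRow [0, b, c, d] 2 = [0, b, c, d] := by simp [stepRow, rowInner, PySem.List.pyGet?, PySem.List.pyIdx?, hb, hc, hd, h0, h1, Ne.symm hb, Ne.symm hc, Ne.symm hd, Ne.symm h0, Ne.symm h1]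
      have e1 : stepRow [0, b, c, d] 1 = [0, b, c, d] := by simp [stepRow, rowInner, PySem.List.pyGet?, PySem.List.pyIdx?, hb, hc, hd, h0, h1, Ne.symm hb, Ne.symm hc, Ne.symm hd, Ne.symm h0, Ne.symm h1]
      have e0 : stepRow [0, b, c, d] 0 = [0, b, c, d] := by simp [stepRow, rowInner, PySem.List.pyGet?, PySem.List.pyIdx?, hb, hc, hd, h0, h1, Ne.symm hb, Ne.symm hc, Ne.symm hd, Ne.symm h0, Ne.symm h1]
      have eB : collapseR [0, b, c, d] = [0, b, c, d] := by simp [collapseR, mergeRevB, hb, hc, hd, h0, h1, Ne.symm hb, Ne.symm hc, Ne.symm hd, Ne.symm h0, Ne.symm h1]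
      simp only [procRow]
      rw [e3, e2, e1, e0, eB]
  · simp only [hb, hc, hd] at *
    have e3 : stepRow [a, 0, 0, 0] 3 = [0, 0, 0, a] := by simp [stepRow, rowInner, PySem.List.pyGet?, PySem.List.pyIdx?, ha, Ne.symm ha]
    have e2 : stepRow [0, 0, 0, a] 2 = [0, 0, 0, a] := by simp [stepRow, rowInner, PySem.List.pyGet?, PySem.List.pyIdx?, ha, Ne.symm ha]
    have e1 : stepRow [0, 0, 0, a] 1 = [0, 0, 0, a] := by simp [stepRow, rowInner, PySem.List.pyGet?, PySem.List.pyIdx?, ha, Ne.symm ha]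
    have e0 : stepRow [0, 0, 0, a] 0 = [0, 0, 0, a] := by simp [stepRow, rowInner, PySem.List.pyGet?, PySem.List.pyIdx?, ha, Ne.symm ha]
    have eB : collapseR [a, 0, 0, 0] = [0, 0, 0, a] := by simp [collapseR, mergeRevB, ha, Ne.symm ha]
    simp only [procRow]
    rw [e3, e2, e1, e0, eB]
  · by_cases h0 : d = a
    · simp only [hb, hc, h0] at *
      have e3 : stepRow [a, 0, 0, a] 3 = [0, 0, 0, 2*a] := by simp [stepRow, rowInner, PySem.List.pyGet?, PySem.List.pyIdx?, ha, hd, Ne.symm ha, Ne.symm hd]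
      have e2 : stepRow [0, 0, 0, 2*a] 2 = [0, 0, 0, 2*a] := by simp [stepRow, rowInner, PySem.List.pyGet?, PySem.List.pyIdx?, ha, hd, Ne.symm ha, Ne.symm hd]
      have e1 : stepRow [0, 0, 0, 2*a] 1 = [0, 0, 0, 2*a] := by simp [stepRow, rowInner, PySem.List.pyGet?, PySem.List.pyIdx?, ha, hd, Ne.symm ha, Ne.symm hd]
      have e0 : stepRow [0, 0, 0, 2*a] 0 = [0, 0, 0, 2*a] := by simp [stepRow, rowInner, PySem.List.pyGet?, PySem.List.pyIdx?, ha, hd, Ne.symm ha, Ne.symm hd]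
      have eB : collapseR [a, 0, 0, a] = [0, 0, 0, 2*a] := by simp [collapseR, mergeRevB, ha, hd, Ne.symm ha, Ne.symm hd]
      simp only [procRow]
      rw [e3, e2, e1, e0, eB]
    · simp only [hb, hc] at *
      have e3 : stepRow [a, 0, 0, d] 3 = [a, 0, 0, d] := by simp [stepRow, rowInner, PySem.List.pyGet?, PySem.List.pyIdx?, ha, hd, h0, Ne.symm ha, Ne.symm hd, Ne.symm h0]
      have e2 : stepRow [a, 0, 0, d] 2 = [0, 0, a, d] := by simp [stepRow, rowInner, PySem.List.pyGet?, PySem.List.pyIdx?, ha, hd, h0, Ne.symm ha, Ne.symm hd, Ne.symm h0]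
      have e1 : stepRow [0, 0, a, d] 1 = [0, 0, a, d] := by simp [stepRow, rowInner, PySem.List.pyGet?, PySem.List.pyIdx?, ha, hd, h0, Ne.symm ha, Ne.symm hd, Ne.symm h0]
      have e0 : stepRow [0, 0, a, d] 0 = [0, 0, a, d] := by simp [stepRow, rowInner, PySem.List.pyGet?, PySem.List.pyIdx?, ha, hd, h0, Ne.symm ha, Ne.symm hd, Ne.symm h0]
      have eB : collapseR [a, 0, 0, d] = [0, 0, a, d] := by simp [collapseR, mergeRevB, ha, hd, h0, Ne.symm ha, Ne.symm hd, Ne.symm h0]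
      simp only [procRow]
      rw [e3, e2, e1, e0, eB]
  · by_cases h0 : c = a
    · simp only [hb, hd, h0] at *
      have e3 : stepRow [a, 0, a, 0] 3 = [0, 0, 0, 2*a] := by simp [stepRow, rowInner, PySem.List.pyGet?, PySem.List.pyIdx?, ha, hc, Ne.symm ha, Ne.symm hc]
      have e2 : stepRow [0, 0, 0, 2*a] 2 = [0, 0, 0, 2*a] := by simp [stepRow, rowInner, PySem.List.pyGet?, PySem.List.pyIdx?, ha, hc, Ne.symm ha, Ne.symm hc]
      have e1 : stepRow [0, 0, 0, 2*a] 1 = [0, 0, 0, 2*a] := by simp [stepRow, rowInner, PySem.List.pyGet?, PySem.List.pyIdx?, ha, hc, Ne.symm ha, Ne.symm hc]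
      have e0 : stepRow [0, 0, 0, 2*a] 0 = [0, 0, 0, 2*a] := by simp [stepRow, rowInner, PySem.List.pyGet?, PySem.List.pyIdx?, ha, hc, Ne.symm ha, Ne.symm hc]
      have eB : collapseR [a, 0, a, 0] = [0, 0, 0, 2*a] := by simp [collapseR, mergeRevB, ha, hc, Ne.symm ha, Ne.symm hc]
      simp only [procRow]
      rw [e3, e2, e1, e0, eB]
    · simp only [hb, hd] at *
      have e3 : stepRow [a, 0, c, 0] 3 = [a, 0, 0, c] := by simp [stepRow, rowInner, PySem.List.pyGet?, PySem.List.pyIdx?, ha, hc, h0, Ne.symm ha, Ne.symm hc, Ne.symm h0]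
      have e2 : stepRow [a, 0, 0, c] 2 = [0, 0, a, c] := by simp [stepRow, rowInner, PySem.List.pyGet?, PySem.List.pyIdx?, ha, hc, h0, Ne.symm ha, Ne.symm hc, Ne.symm h0]
      have e1 : stepRow [0, 0, a, c] 1 = [0, 0, a, c] := by simp [stepRow, rowInner, PySem.List.pyGet?, PySem.List.pyIdx?, ha, hc, h0, Ne.symm ha, Ne.symm hc, Ne.symm h0]
      have e0 : stepRow [0, 0, a, c] 0 = [0, 0, a, c] := by simp [stepRow, rowInner, PySem.List.pyGet?, PySem.List.pyIdx?, ha, hc, h0, Ne.symm ha, Ne.symm hc, Ne.symm h0]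
      have eB : collapseR [a, 0, c, 0] = [0, 0, a, c] := by simp [collapseR, mergeRevB, ha, hc, h0, Ne.symm ha, Ne.symm hc, Ne.symm h0]
      simp only [procRow]
      rw [e3, e2, e1, e0, eB]
  · by_cases h0 : c = a <;> by_cases h1 : d = c
    · simp only [hb, h0, h1] at *
      have e3 : stepRow [a, 0, a, a] 3 = [a, 0, 0, 2*a] := by simp [stepRow, rowInner, PySem.List.pyGet?, PySem.List.pyIdx?, ha, hc, hd, Ne.symm ha, Ne.symm hc, Ne.symm hd]
      have e2 : stepRow [a, 0, 0, 2*a] 2 = [0, 0, a, 2*a] := by simp [stepRow, rowInner, PySem.List.pyGet?, PySem.List.pyIdx?, ha, hc, hd, Ne.symm ha, Ne.symm hc, Ne.symm hd]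
      have e1 : stepRow [0, 0, a, 2*a] 1 = [0, 0, a, 2*a] := by simp [stepRow, rowInner, PySem.List.pyGet?, PySem.List.pyIdx?, ha, hc, hd, Ne.symm ha, Ne.symm hc, Ne.symm hd]
      have e0 : stepRow [0, 0, a, 2*a] 0 = [0, 0, a, 2*a] := by simp [stepRow, rowInner, PySem.List.pyGet?, PySem.List.pyIdx?, ha, hc, hd, Ne.symm ha, Ne.symm hc, Ne.symm hd]
      have eB : collapseR [a, 0, a, a] = [0, 0, a, 2*a] := by simp [collapseR, mergeRevB, ha, hc, hd, Ne.symm ha, Ne.symm hc, Ne.symm hd]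
      simp only [procRow]
      rw [e3, e2, e1, e0, eB]
    · simp only [hb, h0] at *
      have e3 : stepRow [a, 0, a, d] 3 = [a, 0, a, d] := by simp [stepRow, rowInner, PySem.List.pyGet?, PySem.List.pyIdx?, ha, hc, hd, h1, Ne.symm ha, Ne.symm hc, Ne.symm hd, Ne.symm h1]
      have e2 : stepRow [a, 0, a, d] 2 = [0, 0, 2*a, d] := by simp [stepRow, rowInner, PySem.List.pyGet?, PySem.List.pyIdx?, ha, hc, hd, h1, Ne.symm ha, Ne.symm hc, Ne.symm hd, Ne.symm h1]
      have e1 : stepRow [0, 0, 2*a, d] 1 = [0, 0, 2*a, d] := by simp [stepRow, rowInner, PySem.List.pyGet?, PySem.List.pyIdx?, ha, hc, hd, h1, Ne.symm ha, Ne.symm hc, Ne.symm hd, Ne.symm h1]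
      have e0 : stepRow [0, 0, 2*a, d] 0 = [0, 0, 2*a, d] := by simp [stepRow, rowInner, PySem.List.pyGet?, PySem.List.pyIdx?, ha, hc, hd, h1, Ne.symm ha, Ne.symm hc, Ne.symm hd, Ne.symm h1]
      have eB : collapseR [a, 0, a, d] = [0, 0, 2*a, d] := by simp [collapseR, mergeRevB, ha, hc, hd, h1, Ne.symm ha, Ne.symm hc, Ne.symm hd, Ne.symm h1]
      simp only [procRow]
      rw [e3, e2, e1, e0, eB]
    · simp only [hb, h1] at *
      have e3 : stepRow [a, 0, c, c] 3 = [a, 0, 0, 2*c] := by simp [stepRow, rowInner, PySem.List.pyGet?, PySem.List.pyIdx?, ha, hc, hd, h0, Ne.symm ha, Ne.symm hc, Ne.symm hd, Ne.symm h0]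
      have e2 : stepRow [a, 0, 0, 2*c] 2 = [0, 0, a, 2*c] := by simp [stepRow, rowInner, PySem.List.pyGet?, PySem.List.pyIdx?, ha, hc, hd, h0, Ne.symm ha, Ne.symm hc, Ne.symm hd, Ne.symm h0]
      have e1 : stepRow [0, 0, a, 2*c] 1 = [0, 0, a, 2*c] := by simp [stepRow, rowInner, PySem.List.pyGet?, PySem.List.pyIdx?, ha, hc, hd, h0, Ne.symm ha, Ne.symm hc, Ne.symm hd, Ne.symm h0]
      have e0 : stepRow [0, 0, a, 2*c] 0 = [0, 0, a, 2*c] := by simp [stepRow, rowInner, PySem.List.pyGet?, PySem.List.pyIdx?, ha, hc, hd, h0, Ne.symm ha, Ne.symm hc, Ne.symm hd, Ne.symm h0]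
      have eB : collapseR [a, 0, c, c] = [0, 0, a, 2*c] := by simp [collapseR, mergeRevB, ha, hc, hd, h0, Ne.symm ha, Ne.symm hc, Ne.symm hd, Ne.symm h0]
      simp only [procRow]
      rw [e3, e2, e1, e0, eB]
    · simp only [hb] at *
      have e3 : stepRow [a, 0, c, d] 3 = [a, 0, c, d] := by simp [stepRow, rowInner, PySem.List.pyGet?, PySem.List.pyIdx?, ha, hc, hd, h0, h1, Ne.symm ha, Ne.symm hc, Ne.symm hd, Ne.symm h0, Ne.symm h1]
      have e2 : stepRow [a, 0, c, d] 2 = [a, 0, c, d] := by simp [stepRow, rowInner, PySem.List.pyGet?, PySem.List.pyIdx?, ha, hc, hd, h0, h1, Ne.symm ha, Ne.symm hc, Ne.symm hd, Ne.symm h0, Ne.symm h1]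
      have e1 : stepRow [a, 0, c, d] 1 = [0, a, c, d] := by simp [stepRow, rowInner, PySem.List.pyGet?, PySem.List.pyIdx?, ha, hc, hd, h0, h1, Ne.symm ha, Ne.symm hc, Ne.symm hd, Ne.symm h0, Ne.symm h1]
      have e0 : stepRow [0, a, c, d] 0 = [0, a, c, d] := by simp [stepRow, rowInner, PySem.List.pyGet?, PySem.List.pyIdx?, ha, hc, hd, h0, h1, Ne.symm ha, Ne.symm hc, Ne.symm hd, Ne.symm h0, Ne.symm h1]
      have eB : collapseR [a, 0, c, d] = [0, a, c, d] := by simp [collapseR, mergeRevB, ha, hc, hd, h0, h1, Ne.symm ha, Ne.symm hc, Ne.symm hd, Ne.symm h0, Ne.symm h1]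
      simp only [procRow]
      rw [e3, e2, e1, e0, eB]
  · by_cases h0 : b = a
    · simp only [hc, hd, h0] at *
      have e3 : stepRow [a, a, 0, 0] 3 = [0, 0, 0, 2*a] := by simp [stepRow, rowInner, PySem.List.pyGet?, PySem.List.pyIdx?, ha, hb, Ne.symm ha, Ne.symm hb]
      have e2 : stepRow [0, 0, 0, 2*a] 2 = [0, 0, 0, 2*a] := by simp [stepRow, rowInner, PySem.List.pyGet?, PySem.List.pyIdx?, ha, hb, Ne.symm ha, Ne.symm hb]
      have e1 : stepRow [0, 0, 0, 2*a] 1 = [0, 0, 0, 2*a] := by simp [stepRow, rowInner, PySem.List.pyGet?, PySem.List.pyIdx?, ha, hb, Ne.symm ha, Ne.symm hb]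
      have e0 : stepRow [0, 0, 0, 2*a] 0 = [0, 0, 0, 2*a] := by simp [stepRow, rowInner, PySem.List.pyGet?, PySem.List.pyIdx?, ha, hb, Ne.symm ha, Ne.symm hb]
      have eB : collapseR [a, a, 0, 0] = [0, 0, 0, 2*a] := by simp [collapseR, mergeRevB, ha, hb, Ne.symm ha, Ne.symm hb]
      simp only [procRow]
      rw [e3, e2, e1, e0, eB]
    · simp only [hc, hd] at *
      have e3 : stepRow [a, b, 0, 0] 3 = [a, 0, 0, b] := by simp [stepRow, rowInner, PySem.List.pyGet?, PySem.List.pyIdx?, ha, hb, h0, Ne.symm ha, Ne.symm hb, Ne.symm h0]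
      have e2 : stepRow [a, 0, 0, b] 2 = [0, 0, a, b] := by simp [stepRow, rowInner, PySem.List.pyGet?, PySem.List.pyIdx?, ha, hb, h0, Ne.symm ha, Ne.symm hb, Ne.symm h0]
      have e1 : stepRow [0, 0, a, b] 1 = [0, 0, a, b] := by simp [stepRow, rowInner, PySem.List.pyGet?, PySem.List.pyIdx?, ha, hb, h0, Ne.symm ha, Ne.symm hb, Ne.symm h0]
      have e0 : stepRow [0, 0, a, b] 0 = [0, 0, a, b] := by simp [stepRow, rowInner, PySem.List.pyGet?, PySem.List.pyIdx?, ha, hb, h0, Ne.symm ha, Ne.symm hb, Ne.symm h0]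
      have eB : collapseR [a, b, 0, 0] = [0, 0, a, b] := by simp [collapseR, mergeRevB, ha, hb, h0, Ne.symm ha, Ne.symm hb, Ne.symm h0]
      simp only [procRow]
      rw [e3, e2, e1, e0, eB]
  · by_cases h0 : b = a <;> by_cases h1 : d = b
    · simp only [hc, h0, h1] at *
      have e3 : stepRow [a, a, 0, a] 3 = [a, 0, 0, 2*a] := by simp [stepRow, rowInner, PySem.List.pyGet?, PySem.List.pyIdx?, ha, hb, hd, Ne.symm ha, Ne.symm hb, Ne.symm hd]
      have e2 : stepRow [a, 0, 0, 2*a] 2 = [0, 0, a, 2*a] := by simp [stepRow, rowInner, PySem.List.pyGet?, PySem.List.pyIdx?, ha, hb, hd, Ne.symm ha, Ne.symm hb, Ne.symm hd]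
      have e1 : stepRow [0, 0, a, 2*a] 1 = [0, 0, a, 2*a] := by simp [stepRow, rowInner, PySem.List.pyGet?, PySem.List.pyIdx?, ha, hb, hd, Ne.symm ha, Ne.symm hb, Ne.symm hd]
      have e0 : stepRow [0, 0, a, 2*a] 0 = [0, 0, a, 2*a] := by simp [stepRow, rowInner, PySem.List.pyGet?, PySem.List.pyIdx?, ha, hb, hd, Ne.symm ha, Ne.symm hb, Ne.symm hd]
      have eB : collapseR [a, a, 0, a] = [0, 0, a, 2*a] := by simp [collapseR, mergeRevB, ha, hb, hd, Ne.symm ha, Ne.symm hb, Ne.symm hd]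
      simp only [procRow]
      rw [e3, e2, e1, e0, eB]
    · simp only [hc, h0] at *
      have e3 : stepRow [a, a, 0, d] 3 = [a, a, 0, d] := by simp [stepRow, rowInner, PySem.List.pyGet?, PySem.List.pyIdx?, ha, hb, hd, h1, Ne.symm ha, Ne.symm hb, Ne.symm hd, Ne.symm h1]
      have e2 : stepRow [a, a, 0, d] 2 = [0, 0, 2*a, d] := by simp [stepRow, rowInner, PySem.List.pyGet?, PySem.List.pyIdx?, ha, hb, hd, h1, Ne.symm ha, Ne.symm hb, Ne.symm hd, Ne.symm h1]
      have e1 : stepRow [0, 0, 2*a, d] 1 = [0, 0, 2*a, d] := by simp [stepRow, rowInner, PySem.List.pyGet?, PySem.List.pyIdx?, ha, hb, hd, h1, Ne.symm ha, Ne.symm hb, Ne.symm hd, Ne.symm h1]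
      have e0 : stepRow [0, 0, 2*a, d] 0 = [0, 0, 2*a, d] := by simp [stepRow, rowInner, PySem.List.pyGet?, PySem.List.pyIdx?, ha, hb, hd, h1, Ne.symm ha, Ne.symm hb, Ne.symm hd, Ne.symm h1]
      have eB : collapseR [a, a, 0, d] = [0, 0, 2*a, d] := by simp [collapseR, mergeRevB, ha, hb, hd, h1, Ne.symm ha, Ne.symm hb, Ne.symm hd, Ne.symm h1]
      simp only [procRow]
      rw [e3, e2, e1, e0, eB]
    · simp only [hc, h1] at *
      have e3 : stepRow [a, b, 0, b] 3 = [a, 0, 0, 2*b] := by simp [stepRow, rowInner, PySem.List.pyGet?, PySem.List.pyIdx?, ha, hb, hd, h0, Ne.symm ha, Ne.symm hb, Ne.symm hd, Ne.symm h0]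
      have e2 : stepRow [a, 0, 0, 2*b] 2 = [0, 0, a, 2*b] := by simp [stepRow, rowInner, PySem.List.pyGet?, PySem.List.pyIdx?, ha, hb, hd, h0, Ne.symm ha, Ne.symm hb, Ne.symm hd, Ne.symm h0]
      have e1 : stepRow [0, 0, a, 2*b] 1 = [0, 0, a, 2*b] := by simp [stepRow, rowInner, PySem.List.pyGet?, PySem.List.pyIdx?, ha, hb, hd, h0, Ne.symm ha, Ne.symm hb, Ne.symm hd, Ne.symm h0]
      have e0 : stepRow [0, 0, a, 2*b] 0 = [0, 0, a, 2*b] := by simp [stepRow, rowInner, PySem.List.pyGet?, PySem.List.pyIdx?, ha, hb, hd, h0, Ne.symm ha, Ne.symm hb, Ne.symm hd, Ne.symm h0]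
      have eB : collapseR [a, b, 0, b] = [0, 0, a, 2*b] := by simp [collapseR, mergeRevB, ha, hb, hd, h0, Ne.symm ha, Ne.symm hb, Ne.symm hd, Ne.symm h0]
      simp only [procRow]
      rw [e3, e2, e1, e0, eB]
    · simp only [hc] at *
      have e3 : stepRow [a, b, 0, d] 3 = [a, b, 0, d] := by simp [stepRow, rowInner, PySem.List.pyGet?, PySem.List.pyIdx?, ha, hb, hd, h0, h1, Ne.symm ha, Ne.symm hb, Ne.symm hd, Ne.symm h0, Ne.symm h1]
      have e2 : stepRow [a, b, 0, d] 2 = [a, 0, b, d] := by simp [stepRow, rowInner, PySem.List.pyGet?, PySem.List.pyIdx?, ha, hb, hd, h0, h1, Ne.symm ha, Ne.symm hb, Ne.symm hd, Ne.symm h0, Ne.symm h1]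
      have e1 : stepRow [a, 0, b, d] 1 = [0, a, b, d] := by simp [stepRow, rowInner, PySem.List.pyGet?, PySem.List.pyIdx?, ha, hb, hd, h0, h1, Ne.symm ha, Ne.symm hb, Ne.symm hd, Ne.symm h0, Ne.symm h1]
      have e0 : stepRow [0, a, b, d] 0 = [0, a, b, d] := by simp [stepRow, rowInner, PySem.List.pyGet?, PySem.List.pyIdx?, ha, hb, hd, h0, h1, Ne.symm ha, Ne.symm hb, Ne.symm hd, Ne.symm h0, Ne.symm h1]
      have eB : collapseR [a, b, 0, d] = [0, a, b, d] := by simp [collapseR, mergeRevB, ha, hb, hd, h0, h1, Ne.symm ha, Ne.symm hb, Ne.symm hd, Ne.symm h0, Ne.symm h1]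
      simp only [procRow]
      rw [e3, e2, e1, e0, eB]
  · by_cases h0 : b = a <;> by_cases h1 : c = b
    · simp only [hd, h0, h1] at *
      have e3 : stepRow [a, a, a, 0] 3 = [a, 0, 0, 2*a] := by simp [stepRow, rowInner, PySem.List.pyGet?, PySem.List.pyIdx?, ha, hb, hc, Ne.symm ha, Ne.symm hb, Ne.symm hc]
      have e2 : stepRow [a, 0, 0, 2*a] 2 = [0, 0, a, 2*a] := by simp [stepRow, rowInner, PySem.List.pyGet?, PySem.List.pyIdx?, ha, hb, hc, Ne.symm ha, Ne.symm hb, Ne.symm hc]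
      have e1 : stepRow [0, 0, a, 2*a] 1 = [0, 0, a, 2*a] := by simp [stepRow, rowInner, PySem.List.pyGet?, PySem.List.pyIdx?, ha, hb, hc, Ne.symm ha, Ne.symm hb, Ne.symm hc]
      have e0 : stepRow [0, 0, a, 2*a] 0 = [0, 0, a, 2*a] := by simp [stepRow, rowInner, PySem.List.pyGet?, PySem.List.pyIdx?, ha, hb, hc, Ne.symm ha, Ne.symm hb, Ne.symm hc]
      have eB : collapseR [a, a, a, 0] = [0, 0, a, 2*a] := by simp [collapseR, mergeRevB, ha, hb, hc, Ne.symm ha, Ne.symm hb, Ne.symm hc]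
      simp only [procRow]
      rw [e3, e2, e1, e0, eB]
    · simp only [hd, h0] at *
      have e3 : stepRow [a, a, c, 0] 3 = [a, a, 0, c] := by simp [stepRow, rowInner, PySem.List.pyGet?, PySem.List.pyIdx?, ha, hb, hc, h1, Ne.symm ha, Ne.symm hb, Ne.symm hc, Ne.symm h1]
      have e2 : stepRow [a, a, 0, c] 2 = [0, 0, 2*a, c] := by simp [stepRow, rowInner, PySem.List.pyGet?, PySem.List.pyIdx?, ha, hb, hc, h1, Ne.symm ha, Ne.symm hb, Ne.symm hc, Ne.symm h1]
      have e1 : stepRow [0, 0, 2*a, c] 1 = [0, 0, 2*a, c] := by simp [stepRow, rowInner, PySem.List.pyGet?, PySem.List.pyIdx?, ha, hb, hc, h1, Ne.symm ha, Ne.symm hb, Ne.symm hc, Ne.symm h1]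
      have e0 : stepRow [0, 0, 2*a, c] 0 = [0, 0, 2*a, c] := by simp [stepRow, rowInner, PySem.List.pyGet?, PySem.List.pyIdx?, ha, hb, hc, h1, Ne.symm ha, Ne.symm hb, Ne.symm hc, Ne.symm h1]
      have eB : collapseR [a, a, c, 0] = [0, 0, 2*a, c] := by simp [collapseR, mergeRevB, ha, hb, hc, h1, Ne.symm ha, Ne.symm hb, Ne.symm hc, Ne.symm h1]
      simp only [procRow]
      rw [e3, e2, e1, e0, eB]
    · simp only [hd, h1] at *
      have e3 : stepRow [a, b, b, 0] 3 = [a, 0, 0, 2*b] := by simp [stepRow, rowInner, PySem.List.pyGet?, PySem.List.pyIdx?, ha, hb, hc, h0, Ne.symm ha, Ne.symm hb, Ne.symm hc, Ne.symm h0]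
      have e2 : stepRow [a, 0, 0, 2*b] 2 = [0, 0, a, 2*b] := by simp [stepRow, rowInner, PySem.List.pyGet?, PySem.List.pyIdx?, ha, hb, hc, h0, Ne.symm ha, Ne.symm hb, Ne.symm hc, Ne.symm h0]
      have e1 : stepRow [0, 0, a, 2*b] 1 = [0, 0, a, 2*b] := by simp [stepRow, rowInner, PySem.List.pyGet?, PySem.List.pyIdx?, ha, hb, hc, h0, Ne.symm ha, Ne.symm hb, Ne.symm hc, Ne.symm h0]
      have e0 : stepRow [0, 0, a, 2*b] 0 = [0, 0, a, 2*b] := by simp [stepRow, rowInner, PySem.List.pyGet?, PySem.List.pyIdx?, ha, hb, hc, h0, Ne.symm ha, Ne.symm hb, Ne.symm hc, Ne.symm h0]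
      have eB : collapseR [a, b, b, 0] = [0, 0, a, 2*b] := by simp [collapseR, mergeRevB, ha, hb, hc, h0, Ne.symm ha, Ne.symm hb, Ne.symm hc, Ne.symm h0]
      simp only [procRow]
      rw [e3, e2, e1, e0, eB]
    · simp only [hd] at *
      have e3 : stepRow [a, b, c, 0] 3 = [a, b, 0, c] := by simp [stepRow, rowInner, PySem.List.pyGet?, PySem.List.pyIdx?, ha, hb, hc, h0, h1, Ne.symm ha, Ne.symm hb, Ne.symm hc, Ne.symm h0, Ne.symm h1]
      have e2 : stepRow [a, b, 0, c] 2 = [a, 0, b, c] := by simp [stepRow, rowInner, PySem.List.pyGet?, PySem.List.pyIdx?, ha, hb, hc, h0, h1, Ne.symm ha, Ne.symm hb, Ne.symm hc, Ne.symm h0, Ne.symm h1]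
      have e1 : stepRow [a, 0, b, c] 1 = [0, a, b, c] := by simp [stepRow, rowInner, PySem.List.pyGet?, PySem.List.pyIdx?, ha, hb, hc, h0, h1, Ne.symm ha, Ne.symm hb, Ne.symm hc, Ne.symm h0, Ne.symm h1]
      have e0 : stepRow [0, a, b, c] 0 = [0, a, b, c] := by simp [stepRow, rowInner, PySem.List.pyGet?, PySem.List.pyIdx?, ha, hb, hc, h0, h1, Ne.symm ha, Ne.symm hb, Ne.symm hc, Ne.symm h0, Ne.symm h1]
      have eB : collapseR [a, b, c, 0] = [0, a, b, c] := by simp [collapseR, mergeRevB, ha, hb, hc, h0, h1, Ne.symm ha, Ne.symm hb, Ne.symm hc, Ne.symm h0, Ne.symm h1]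
      simp only [procRow]
      rw [e3, e2, e1, e0, eB]
  · by_cases h0 : b = a <;> by_cases h1 : c = b <;> by_cases h2 : d = c
    · simp only [h0, h1, h2] at *
      have e3 : stepRow [a, a, a, a] 3 = [a, a, 0, 2*a] := by simp [stepRow, rowInner, PySem.List.pyGet?, PySem.List.pyIdx?, ha, hb, hc, hd, Ne.symm ha, Ne.symm hb, Ne.symm hc, Ne.symm hd]
      have e2 : stepRow [a, a, 0, 2*a] 2 = [0, 0, 2*a, 2*a] := by simp [stepRow, rowInner, PySem.List.pyGet?, PySem.List.pyIdx?, ha, hb, hc, hd, Ne.symm ha, Ne.symm hb, Ne.symm hc, Ne.symm hd]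
      have e1 : stepRow [0, 0, 2*a, 2*a] 1 = [0, 0, 2*a, 2*a] := by simp [stepRow, rowInner, PySem.List.pyGet?, PySem.List.pyIdx?, ha, hb, hc, hd, Ne.symm ha, Ne.symm hb, Ne.symm hc, Ne.symm hd]
      have e0 : stepRow [0, 0, 2*a, 2*a] 0 = [0, 0, 2*a, 2*a] := by simp [stepRow, rowInner, PySem.List.pyGet?, PySem.List.pyIdx?, ha, hb, hc, hd, Ne.symm ha, Ne.symm hb, Ne.symm hc, Ne.symm hd]
      have eB : collapseR [a, a, a, a] = [0, 0, 2*a, 2*a] := by simp [collapseR, mergeRevB, ha, hb, hc, hd, Ne.symm ha, Ne.symm hb, Ne.symm hc, Ne.symm hd]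
      simp only [procRow]
      rw [e3, e2, e1, e0, eB]
    · simp only [h0, h1] at *
      have e3 : stepRow [a, a, a, d] 3 = [a, a, a, d] := by simp [stepRow, rowInner, PySem.List.pyGet?, PySem.List.pyIdx?, ha, hb, hc, hd, h2, Ne.symm ha, Ne.symm hb, Ne.symm hc, Ne.symm hd, Ne.symm h2]
      have e2 : stepRow [a, a, a, d] 2 = [a, 0, 2*a, d] := by simp [stepRow, rowInner, PySem.List.pyGet?, PySem.List.pyIdx?, ha, hb, hc, hd, h2, Ne.symm ha, Ne.symm hb, Ne.symm hc, Ne.symm hd, Ne.symm h2]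
      have e1 : stepRow [a, 0, 2*a, d] 1 = [0, a, 2*a, d] := by simp [stepRow, rowInner, PySem.List.pyGet?, PySem.List.pyIdx?, ha, hb, hc, hd, h2, Ne.symm ha, Ne.symm hb, Ne.symm hc, Ne.symm hd, Ne.symm h2]
      have e0 : stepRow [0, a, 2*a, d] 0 = [0, a, 2*a, d] := by simp [stepRow, rowInner, PySem.List.pyGet?, PySem.List.pyIdx?, ha, hb, hc, hd, h2, Ne.symm ha, Ne.symm hb, Ne.symm hc, Ne.symm hd, Ne.symm h2]
      have eB : collapseR [a, a, a, d] = [0, a, 2*a, d] := by simp [collapseR, mergeRevB, ha, hb, hc, hd, h2, Ne.symm ha, Ne.symm hb, Ne.symm hc, Ne.symm hd, Ne.symm h2]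
      simp only [procRow]
      rw [e3, e2, e1, e0, eB]
    · simp only [h0, h2] at *
      have e3 : stepRow [a, a, c, c] 3 = [a, a, 0, 2*c] := by simp [stepRow, rowInner, PySem.List.pyGet?, PySem.List.pyIdx?, ha, hb, hc, hd, h1, Ne.symm ha, Ne.symm hb, Ne.symm hc, Ne.symm hd, Ne.symm h1]
      have e2 : stepRow [a, a, 0, 2*c] 2 = [0, 0, 2*a, 2*c] := by simp [stepRow, rowInner, PySem.List.pyGet?, PySem.List.pyIdx?, ha, hb, hc, hd, h1, Ne.symm ha, Ne.symm hb, Ne.symm hc, Ne.symm hd, Ne.symm h1]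
      have e1 : stepRow [0, 0, 2*a, 2*c] 1 = [0, 0, 2*a, 2*c] := by simp [stepRow, rowInner, PySem.List.pyGet?, PySem.List.pyIdx?, ha, hb, hc, hd, h1, Ne.symm ha, Ne.symm hb, Ne.symm hc, Ne.symm hd, Ne.symm h1]
      have e0 : stepRow [0, 0, 2*a, 2*c] 0 = [0, 0, 2*a, 2*c] := by simp [stepRow, rowInner, PySem.List.pyGet?, PySem.List.pyIdx?, ha, hb, hc, hd, h1, Ne.symm ha, Ne.symm hb, Ne.symm hc, Ne.symm hd, Ne.symm h1]
      have eB : collapseR [a, a, c, c] = [0, 0, 2*a, 2*c] := by simp [collapseR, mergeRevB, ha, hb, hc, hd, h1, Ne.symm ha, Ne.symm hb, Ne.symm hc, Ne.symm hd, Ne.symm h1]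
      simp only [procRow]
      rw [e3, e2, e1, e0, eB]
    · simp only [h0] at *
      have e3 : stepRow [a, a, c, d] 3 = [a, a, c, d] := by simp [stepRow, rowInner, PySem.List.pyGet?, PySem.List.pyIdx?, ha, hb, hc, hd, h1, h2, Ne.symm ha, Ne.symm hb, Ne.symm hc, Ne.symm hd, Ne.symm h1, Ne.symm h2]
      have e2 : stepRow [a, a, c, d] 2 = [a, a, c, d] := by simp [stepRow, rowInner, PySem.List.pyGet?, PySem.List.pyIdx?, ha, hb, hc, hd, h1, h2, Ne.symm ha, Ne.symm hb, Ne.symm hc, Ne.symm hd, Ne.symm h1, Ne.symm h2]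
      have e1 : stepRow [a, a, c, d] 1 = [0, 2*a, c, d] := by simp [stepRow, rowInner, PySem.List.pyGet?, PySem.List.pyIdx?, ha, hb, hc, hd, h1, h2, Ne.symm ha, Ne.symm hb, Ne.symm hc, Ne.symm hd, Ne.symm h1, Ne.symm h2]
      have e0 : stepRow [0, 2*a, c, d] 0 = [0, 2*a, c, d] := by simp [stepRow, rowInner, PySem.List.pyGet?, PySem.List.pyIdx?, ha, hb, hc, hd, h1, h2, Ne.symm ha, Ne.symm hb, Ne.symm hc, Ne.symm hd, Ne.symm h1, Ne.symm h2]
      have eB : collapseR [a, a, c, d] = [0, 2*a, c, d] := by simp [collapseR, mergeRevB, ha, hb, hc, hd, h1, h2, Ne.symm ha, Ne.symm hb, Ne.symm hc, Ne.symm hd, Ne.symm h1, Ne.symm h2]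
      simp only [procRow]
      rw [e3, e2, e1, e0, eB]
    · simp only [h1, h2] at *
      have e3 : stepRow [a, b, b, b] 3 = [a, b, 0, 2*b] := by simp [stepRow, rowInner, PySem.List.pyGet?, PySem.List.pyIdx?, ha, hb, hc, hd, h0, Ne.symm ha, Ne.symm hb, Ne.symm hc, Ne.symm hd, Ne.symm h0]
      have e2 : stepRow [a, b, 0, 2*b] 2 = [a, 0, b, 2*b] := by simp [stepRow, rowInner, PySem.List.pyGet?, PySem.List.pyIdx?, ha, hb, hc, hd, h0, Ne.symm ha, Ne.symm hb, Ne.symm hc, Ne.symm hd, Ne.symm h0]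
      have e1 : stepRow [a, 0, b, 2*b] 1 = [0, a, b, 2*b] := by simp [stepRow, rowInner, PySem.List.pyGet?, PySem.List.pyIdx?, ha, hb, hc, hd, h0, Ne.symm ha, Ne.symm hb, Ne.symm hc, Ne.symm hd, Ne.symm h0]
      have e0 : stepRow [0, a, b, 2*b] 0 = [0, a, b, 2*b] := by simp [stepRow, rowInner, PySem.List.pyGet?, PySem.List.pyIdx?, ha, hb, hc, hd, h0, Ne.symm ha, Ne.symm hb, Ne.symm hc, Ne.symm hd, Ne.symm h0]
      have eB : collapseR [a, b, b, b] = [0, a, b, 2*b] := by simp [collapseR, mergeRevB, ha, hb, hc, hd, h0, Ne.symm ha, Ne.symm hb, Ne.symm hc, Ne.symm hd, Ne.symm h0]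
      simp only [procRow]
      rw [e3, e2, e1, e0, eB]
    · simp only [h1] at *
      have e3 : stepRow [a, b, b, d] 3 = [a, b, b, d] := by simp [stepRow, rowInner, PySem.List.pyGet?, PySem.List.pyIdx?, ha, hb, hc, hd, h0, h2, Ne.symm ha, Ne.symm hb, Ne.symm hc, Ne.symm hd, Ne.symm h0, Ne.symm h2]
      have e2 : stepRow [a, b, b, d] 2 = [a, 0, 2*b, d] := by simp [stepRow, rowInner, PySem.List.pyGet?, PySem.List.pyIdx?, ha, hb, hc, hd, h0, h2, Ne.symm ha, Ne.symm hb, Ne.symm hc, Ne.symm hd, Ne.symm h0, Ne.symm h2]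
      have e1 : stepRow [a, 0, 2*b, d] 1 = [0, a, 2*b, d] := by simp [stepRow, rowInner, PySem.List.pyGet?, PySem.List.pyIdx?, ha, hb, hc, hd, h0, h2, Ne.symm ha, Ne.symm hb, Ne.symm hc, Ne.symm hd, Ne.symm h0, Ne.symm h2]
      have e0 : stepRow [0, a, 2*b, d] 0 = [0, a, 2*b, d] := by simp [stepRow, rowInner, PySem.List.pyGet?, PySem.List.pyIdx?, ha, hb, hc, hd, h0, h2, Ne.symm ha, Ne.symm hb, Ne.symm hc, Ne.symm hd, Ne.symm h0, Ne.symm h2]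
      have eB : collapseR [a, b, b, d] = [0, a, 2*b, d] := by simp [collapseR, mergeRevB, ha, hb, hc, hd, h0, h2, Ne.symm ha, Ne.symm hb, Ne.symm hc, Ne.symm hd, Ne.symm h0, Ne.symm h2]
      simp only [procRow]
      rw [e3, e2, e1, e0, eB]
    · simp only [h2] at *
      have e3 : stepRow [a, b, c, c] 3 = [a, b, 0, 2*c] := by simp [stepRow, rowInner, PySem.List.pyGet?, PySem.List.pyIdx?, ha, hb, hc, hd, h0, h1, Ne.symm ha, Ne.symm hb, Ne.symm hc, Ne.symm hd, Ne.symm h0, Ne.symm h1]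
      have e2 : stepRow [a, b, 0, 2*c] 2 = [a, 0, b, 2*c] := by simp [stepRow, rowInner, PySem.List.pyGet?, PySem.List.pyIdx?, ha, hb, hc, hd, h0, h1, Ne.symm ha, Ne.symm hb, Ne.symm hc, Ne.symm hd, Ne.symm h0, Ne.symm h1]
      have e1 : stepRow [a, 0, b, 2*c] 1 = [0, a, b, 2*c] := by simp [stepRow, rowInner, PySem.List.pyGet?, PySem.List.pyIdx?, ha, hb, hc, hd, h0, h1, Ne.symm ha, Ne.symm hb, Ne.symm hc, Ne.symm hd, Ne.symm h0, Ne.symm h1]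
      have e0 : stepRow [0, a, b, 2*c] 0 = [0, a, b, 2*c] := by simp [stepRow, rowInner, PySem.List.pyGet?, PySem.List.pyIdx?, ha, hb, hc, hd, h0, h1, Ne.symm ha, Ne.symm hb, Ne.symm hc, Ne.symm hd, Ne.symm h0, Ne.symm h1]
      have eB : collapseR [a, b, c, c] = [0, a, b, 2*c] := by simp [collapseR, mergeRevB, ha, hb, hc, hd, h0, h1, Ne.symm ha, Ne.symm hb, Ne.symm hc, Ne.symm hd, Ne.symm h0, Ne.symm h1]
      simp only [procRow]
      rw [e3, e2, e1, e0, eB]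
    · have e3 : stepRow [a, b, c, d] 3 = [a, b, c, d] := by simp [stepRow, rowInner, PySem.List.pyGet?, PySem.List.pyIdx?, ha, hb, hc, hd, h0, h1, h2, Ne.symm ha, Ne.symm hb, Ne.symm hc, Ne.symm hd, Ne.symm h0, Ne.symm h1, Ne.symm h2]
      have e2 : stepRow [a, b, c, d] 2 = [a, b, c, d] := by simp [stepRow, rowInner, PySem.List.pyGet?, PySem.List.pyIdx?, ha, hb, hc, hd, h0, h1, h2, Ne.symm ha, Ne.symm hb, Ne.symm hc, Ne.symm hd, Ne.symm h0, Ne.symm h1, Ne.symm h2]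
      have e1 : stepRow [a, b, c, d] 1 = [a, b, c, d] := by simp [stepRow, rowInner, PySem.List.pyGet?, PySem.List.pyIdx?, ha, hb, hc, hd, h0, h1, h2, Ne.symm ha, Ne.symm hb, Ne.symm hc, Ne.symm hd, Ne.symm h0, Ne.symm h1, Ne.symm h2]
      have e0 : stepRow [a, b, c, d] 0 = [a, b, c, d] := by simp [stepRow, rowInner, PySem.List.pyGet?, PySem.List.pyIdx?, ha, hb, hc, hd, h0, h1, h2, Ne.symm ha, Ne.symm hb, Ne.symm hc, Ne.symm hd, Ne.symm h0, Ne.symm h1, Ne.symm h2]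
      have eB : collapseR [a, b, c, d] = [a, b, c, d] := by simp [collapseR, mergeRevB, ha, hb, hc, hd, h0, h1, h2, Ne.symm ha, Ne.symm hb, Ne.symm hc, Ne.symm hd, Ne.symm h0, Ne.symm h1, Ne.symm h2]
      simp only [procRow]
      rw [e3, e2, e1, e0, eB]

theorem setAppendLeft (l1 l2 : List Int) (n : Nat) (v : Int) (h : n < l1.length) :
    (l1 ++ l2).set n v = l1.set n v ++ l2 := by
  induction l1 generalizing n with
  | nil => simp at h
  | cons x xs ih =>
    cases n with
    | zero => simp
    | succ n => simp only [List.cons_append, List.set_cons_succ]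
                rw [ih n (by simpa using h)]

theorem pyGetAppendLeft (l1 l2 : List Int) (p : Int) (h0 : 0 ≤ p) (h : p < l1.length) :
    PySem.List.pyGet? (l1 ++ l2) p = PySem.List.pyGet? l1 p := by
  rw [PySem.List.pyGet?_of_nonneg _ h0, PySem.List.pyGet?_of_nonneg _ h0,
    List.getElem?_append_left (by omega)]

theorem rowInner_length (f : Nat) : ∀ (r : List Int) (j : Nat) (p1 curr : Int),
    (rowInner f r j p1 curr).length = r.length := by
  induction f with
  | zero => intro r j p1 curr; rfl
  | succ f ih => intro r j p1 curr
                 simp only [rowInner]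
                 split_ifs <;> simp [ih, List.length_set]

theorem rowInner_append (f : Nat) : ∀ (r tail : List Int) (j : Nat) (p1 curr : Int),
    r.length = 4 → j < 4 → p1 < 4 →
    rowInner f (r ++ tail) j p1 curr = rowInner f r j p1 curr ++ tail := by
  induction f with
  | zero => intros; rfl
  | succ f ih =>
    intro r tail j p1 curr hr hj hp
    by_cases hp0 : p1 ≥ 0
    · have hget : PySem.List.pyGet? (r ++ tail) p1 = PySem.List.pyGet? r p1 :=
        pyGetAppendLeft _ _ _ hp0 (by omega)
      have hset1 : ∀ v : Int, (r ++ tail).set j v = r.set j v ++ tail :=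
        fun v => setAppendLeft _ _ _ _ (by omega)
      have hset2 : ∀ (l : List Int) (v : Int), l.length = 4 →
          (l ++ tail).set p1.toNat v = l.set p1.toNat v ++ tail :=
        fun l v hl => setAppendLeft _ _ _ _ (by omega)
      simp only [rowInner, if_pos hp0, hget]
      split_ifs
      · rw [hset1, hset2 _ _ (by simp [hr])]
        exact ih _ _ _ _ _ (by simp [hr]) hj (by simp only [Int.ofNat_eq_natCast]; omega)
      · exact ih _ _ _ _ _ hr hj (by omega)
      · rw [hset1, hset2 _ _ (by simp [hr])]
      · rfl
      · exact ih _ _ _ _ _ hr hj (by omega)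
    · simp only [rowInner, if_neg hp0]

theorem stepRow_append (r tail : List Int) (j : Nat) (hr : r.length = 4) (hj : j < 4) :
    stepRow (r ++ tail) j = stepRow r j ++ tail := by
  unfold stepRow
  rw [pyGetAppendLeft _ _ _ (by simp only [Int.ofNat_eq_natCast]; omega)
        (by simp only [Int.ofNat_eq_natCast]; omega)]
  exact rowInner_append 9 r tail j _ _ hr hj (by simp only [Int.ofNat_eq_natCast]; omega)

theorem stepRow_length (r : List Int) (j : Nat) : (stepRow r j).length = r.length :=
  rowInner_length 9 r j _ _

theorem procRow_eq_w (a b c d : Int) (tail : List Int) :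
    procRow (a :: b :: c :: d :: tail) = collapseR [a, b, c, d] ++ tail := by
  show procRow ([a, b, c, d] ++ tail) = _
  unfold procRow
  rw [stepRow_append _ _ _ rfl (by omega),
      stepRow_append _ _ _ (by rw [stepRow_length]; rfl) (by omega),
      stepRow_append _ _ _ (by rw [stepRow_length, stepRow_length]; rfl) (by omega),
      stepRow_append _ _ _ (by rw [stepRow_length, stepRow_length, stepRow_length]; rfl) (by omega)]
  rw [show stepRow (stepRow (stepRow (stepRow [a, b, c, d] 3) 2) 1) 0
        = procRow [a, b, c, d] from rfl, procRow_eq]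

theorem stepA_c1 (x : List Int) (rest : List (List Int)) (j : Nat) :
    stepA (x :: rest) 1 j = x :: stepA rest 0 j := by
  rw [show (1:Nat) = 0+1 from rfl, stepA_succ]
theorem stepA_c2 (x : List Int) (rest : List (List Int)) (j : Nat) :
    stepA (x :: rest) 2 j = x :: stepA rest 1 j := by
  rw [show (2:Nat) = 1+1 from rfl, stepA_succ]
theorem stepA_c3 (x : List Int) (rest : List (List Int)) (j : Nat) :
    stepA (x :: rest) 3 j = x :: stepA rest 2 j := by
  rw [show (3:Nat) = 2+1 from rfl, stepA_succ]

theorem foldA_cons (r0 r1 r2 r3 : List Int) (rest : List (List Int)) :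
    (List.range 4).foldl (fun b i => [3,2,1,0].foldl (fun b j => stepA b i j) b)
        (r0 :: r1 :: r2 :: r3 :: rest)
      = procRow r0 :: procRow r1 :: procRow r2 :: procRow r3 :: rest := by
  simp only [show List.range 4 = [0,1,2,3] from rfl, List.foldl,
    stepA_c1, stepA_c2, stepA_c3, stepA_zero, procRow]

theorem foldAlt_cons (r0 r1 r2 r3 : List Int) (rest : List (List Int)) :
    (List.range 4).foldl (fun b i => b.set i (collapseW (b.getD i [])))
        (r0 :: r1 :: r2 :: r3 :: rest)
      = collapseW r0 :: collapseW r1 :: collapseW r2 :: collapseW r3 :: rest := by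
  simp [show List.range 4 = [0,1,2,3] from rfl]

theorem collapseW_eq (a b c d : Int) (t : List Int) :
    collapseW (a :: b :: c :: d :: t) = collapseR [a, b, c, d] ++ t := by
  simp [collapseW, collapseR]

theorem len4ge (l : List Int) (h : 4 ≤ l.length) :
    ∃ a b c d t, l = a :: b :: c :: d :: t := by
  rcases l with _ | ⟨a, l⟩; · simp at h
  rcases l with _ | ⟨b, l⟩; · simp at h
  rcases l with _ | ⟨c, l⟩; · simp at h
  rcases l with _ | ⟨d, l⟩; · simp at h
  exact ⟨a, b, c, d, l, rfl⟩

theorem board4ge (board : List (List Int)) (h : 4 ≤ board.length) :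
    ∃ r0 r1 r2 r3 rest, board = r0 :: r1 :: r2 :: r3 :: rest := by
  rcases board with _ | ⟨r0, l⟩; · simp at h
  rcases l with _ | ⟨r1, l⟩; · simp at h
  rcases l with _ | ⟨r2, l⟩; · simp at h
  rcases l with _ | ⟨r3, l⟩; · simp at h
  exact ⟨r0, r1, r2, r3, l, rfl⟩

-- the two folds agree on any board with at least 4 rows whose first four are at least 4 wide
theorem core_fold (b : List (List Int)) (h1 : 4 ≤ b.length)
    (h2 : ∀ r ∈ b.take 4, 4 ≤ r.length) :
    (List.range 4).foldl (fun b i => [3,2,1,0].foldl (fun b j => stepA b i j) b) b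
      = (List.range 4).foldl (fun b i => b.set i (collapseW (b.getD i []))) b := by
  obtain ⟨r0, r1, r2, r3, rest, rfl⟩ := board4ge b h1
  obtain ⟨a0, b0, c0, d0, t0, rfl⟩ := len4ge r0 (h2 _ (by simp))
  obtain ⟨a1, b1, c1, d1, t1, rfl⟩ := len4ge r1 (h2 _ (by simp))
  obtain ⟨a2, b2, c2, d2, t2, rfl⟩ := len4ge r2 (h2 _ (by simp))
  obtain ⟨a3, b3, c3, d3, t3, rfl⟩ := len4ge r3 (h2 _ (by simp))
  rw [foldA_cons, foldAlt_cons, procRow_eq_w, procRow_eq_w, procRow_eq_w, procRow_eq_w,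
      collapseW_eq, collapseW_eq, collapseW_eq, collapseW_eq]

-- B's rotate equals A's rotate (A re-wraps each row with an identity comprehension)
theorem zipStarB_eq (rows : List (List Int)) : zipStarB rows = zipStar rows := rfl

theorem rotateB_eq (b : List (List Int)) (t : Nat) : rotateB b t = rotateA b t := by
  simp [rotateA, rotateB, zipStarB_eq]

-- shape of one rotation step: ≥4 rows each ≥4 wide is preserved
def GoodB (b : List (List Int)) : Prop := 4 ≤ b.length ∧ ∀ r ∈ b, 4 ≤ r.length

theorem foldl_min_ge (l : List Nat) (acc : Nat) (ha : 4 ≤ acc) (h : ∀ x ∈ l, 4 ≤ x) :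
    4 ≤ l.foldl min acc := by
  induction l generalizing acc with
  | nil => exact ha
  | cons x xs ih =>
    exact ih _ (le_min ha (h x (by simp))) (fun y hy => h y (by simp [hy]))

theorem zipStar_good (b : List (List Int)) (h : GoodB b) : GoodB (zipStarB b.reverse) := by
  obtain ⟨h1, h2⟩ := h
  constructor
  · simp only [zipStarB, List.length_map, List.length_range]
    rcases hrev : b.reverse.map List.length with _ | ⟨x, xs⟩
    · have hb : b = [] := by simpa using congrArg List.length hrev
      simp [hb] at h1
    · have hall : ∀ v ∈ x :: xs, 4 ≤ v := by
        intro v hv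
        rw [← hrev] at hv
        simp only [List.mem_map, List.mem_reverse] at hv
        obtain ⟨r, hr, rfl⟩ := hv
        exact h2 r hr
      simpa [List.min?] using foldl_min_ge xs x (hall x (by simp)) (fun y hy => hall y (by simp [hy]))
  · intro r hr
    simp only [zipStarB, List.mem_map] at hr
    obtain ⟨k, _, rfl⟩ := hr
    simp
    omega

theorem rotate_good (b : List (List Int)) (t : Nat) (h : GoodB b) : GoodB (rotateB b t) := by
  induction t with
  | zero => exact h
  | succ t ih => rw [rotateB, Function.iterate_succ_apply']
                 exact zipStar_good _ ih

-- ===== VERDICT (by name: the statement is the Claim_ definition above) =====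
theorem solve_spec : Claim_equal_solve := by
  intro board direction _ hpre
  obtain ⟨hrot, hdef⟩ := hpre
  show solve _ _ = solve_alt _ _
  by_cases h3 : direction = 3
  · subst h3
    have hg : GoodB (rotateB board 3) := rotate_good _ 3 ⟨(hrot (by norm_num)).1,
      fun r hr => (hrot (by norm_num)).2 r hr⟩
    simp only [solve, solve_alt, Int.reduceEq, reduceIte]
    rw [← rotateB_eq, ← rotateB_eq,
        core_fold _ hg.1 (fun r hr => hg.2 r (List.mem_of_mem_take hr))]
  · by_cases h0 : direction = 0
    · subst h0
      have hg : GoodB (rotateB board 2) := rotate_good _ 2 ⟨(hrot (by norm_num)).1,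
        fun r hr => (hrot (by norm_num)).2 r hr⟩
      simp only [solve, solve_alt, Int.reduceEq, reduceIte]
      rw [← rotateB_eq, ← rotateB_eq,
          core_fold _ hg.1 (fun r hr => hg.2 r (List.mem_of_mem_take hr))]
    · by_cases h1 : direction = 1
      · subst h1
        have hg : GoodB (rotateB board 1) := rotate_good _ 1 ⟨(hrot (by norm_num)).1,
          fun r hr => (hrot (by norm_num)).2 r hr⟩
        simp only [solve, solve_alt, Int.reduceEq, reduceIte]
        rw [← rotateB_eq, ← rotateB_eq,
            core_fold _ hg.1 (fun r hr => hg.2 r (List.mem_of_mem_take hr))]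
      · have hd := hdef (by simp [h3, h0, h1])
        simp only [solve, solve_alt, if_neg h3, if_neg h0, if_neg h1]
        rw [core_fold _ hd.1 hd.2]
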